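-- pv_equiv track=rewrite | github.com/simonherlin/pokemon_first | tools/generate_map_tiles.py | gen_dojo
-- ===== SOURCE A (Python) =====
-- ETAGERE = 28; TAPIS = 29; SOL_CARR = 30; MUR_MOTIF = 31
--
-- ETAGERE = 28; TAPIS = 29; SOL_CARR = 30; MUR_MOTIF = 31
--
-- PLANTE = 36; ESC_UP = 37; ESC_DOWN = 38; PAILLASSON = 39
--
-- PORTE_INT = 40; FENETRE_INT = 41; SOL_BOIS = 42; MUR_EXT_F = 43
--
-- def make_grid(w, h, fill=0):
--     return [[fill]*w for _ in range(h)]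
--
-- def make_empty_grid(w, h):
--     return [[-1]*w for _ in range(h)]
--
-- def gen_dojo(w, h):
--     """Dojo de combat."""
--     sol = make_grid(w, h, SOL_BOIS)
--     obj = make_empty_grid(w, h)
--     for x in range(w):
--         sol[0][x] = MUR_MOTIF
--     for y in range(h):
--         sol[y][0] = MUR_MOTIF
--         sol[y][w-1] = MUR_MOTIF
--     # Tapis central
--     cy, cx = h//2, w//2
--     for dy in range(-2, 3):
--         for dx in range(-3, 4):
--             ny, nx = cy+dy, cx+dx
--             if 0 < ny < h and 0 < nx < w-1:
--                 sol[ny][nx] = TAPIS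
--     sol[h-1][cx] = PAILLASSON
--     return sol, obj
-- ===== SOURCE B (Python) =====
-- TAPIS = 29; MUR_MOTIF = 31; PAILLASSON = 39; SOL_BOIS = 42
--
-- def gen_dojo(w, h):
--     """Dojo de combat."""
--     cy, cx = h // 2, w // 2
--
--     def classify(y, x):
--         if y == h - 1 and x == cx:
--             return PAILLASSON
--         if y == 0 or x == 0 or x == w - 1:
--             return MUR_MOTIF
--         if abs(y - cy) <= 2 and abs(x - cx) <= 3:
--             return TAPIS
--         return SOL_BOIS
--
--     sol = [[classify(y, x) for x in range(w)] for y in range(h)]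
--     obj = [[-1] * w for _ in range(h)]
--     return sol, obj
-- ===== Notes on version B (the rewrite author's own statement) =====
-- stated objective: simpler
-- what changed: Replaces the fill-then-overwrite layering (four mutation loops over a pre-filled grid) with a single per-cell classification comprehension that decides each tile once by priority (doormat > wall > carpet > floor).
import Mathlib
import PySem

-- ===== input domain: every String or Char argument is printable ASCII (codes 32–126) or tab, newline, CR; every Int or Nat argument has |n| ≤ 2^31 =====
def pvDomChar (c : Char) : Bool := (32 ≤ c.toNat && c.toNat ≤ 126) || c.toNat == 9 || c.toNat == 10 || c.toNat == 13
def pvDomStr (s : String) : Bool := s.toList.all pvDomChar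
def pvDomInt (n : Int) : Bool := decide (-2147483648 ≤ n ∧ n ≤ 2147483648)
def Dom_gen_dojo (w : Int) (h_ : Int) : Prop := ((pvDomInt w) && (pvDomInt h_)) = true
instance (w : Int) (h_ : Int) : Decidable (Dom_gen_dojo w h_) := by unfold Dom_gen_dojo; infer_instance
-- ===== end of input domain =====

-- B replaces A's fill-then-overwrite mutation loops by a single per-cell classification
-- comprehension (objective: simpler); equivalence proved for w ≥ 1 and h ≥ 1 (elsewhere A raises).

-- ===== PORT A =====
-- make_grid / make_empty_grid: [[fill]*w for _ in range(h)] (negative w or h yields empty, as in Python)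
def pvMakeGrid (w h_ fill : Int) : List (List Int) :=
  List.replicate h_.toNat (List.replicate w.toNat fill)

-- sol[y][x] = v for in-range nonnegative-after-wrap indices; Python raises out of range
-- (those inputs are excluded by Pre_gen_dojo, where this branch returns g unchanged)
def pvSetCell (g : List (List Int)) (y x v : Int) : List (List Int) :=
  let j := if y < 0 then y + g.length else y
  if 0 ≤ j ∧ j < g.length then
    g.modify j.toNat (fun row =>
      let i := if x < 0 then x + row.length else x
      if 0 ≤ i ∧ i < row.length then row.set i.toNat v else row)
  else g

def gen_dojo (w : Int) (h_ : Int) : List (List Int) × List (List Int) :=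
  let sol0 := pvMakeGrid w h_ 42
  let obj := pvMakeGrid w h_ (-1)
  let sol1 := (PySem.List.pyRange 0 w 1).foldl (fun s x => pvSetCell s 0 x 31) sol0
  let sol2 := (PySem.List.pyRange 0 h_ 1).foldl
      (fun s y => pvSetCell (pvSetCell s y 0 31) y (w - 1) 31) sol1
  let cy := PySem.Int.floordiv h_ 2
  let cx := PySem.Int.floordiv w 2
  let sol3 := (PySem.List.pyRange (-2) 3 1).foldl (fun s dy =>
      (PySem.List.pyRange (-3) 4 1).foldl (fun s dx =>
        let ny := cy + dy
        let nx := cx + dx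
        if 0 < ny ∧ ny < h_ ∧ 0 < nx ∧ nx < w - 1 then pvSetCell s ny nx 29 else s) s) sol2
  let sol4 := pvSetCell sol3 (h_ - 1) cx 39
  (sol4, obj)

-- ===== PORT B =====
def pvClassify (w h_ cy cx y x : Int) : Int :=
  if y = h_ - 1 ∧ x = cx then 39
  else if y = 0 ∨ x = 0 ∨ x = w - 1 then 31
  else if (y - cy).natAbs ≤ 2 ∧ (x - cx).natAbs ≤ 3 then 29
  else 42

def gen_dojo_alt (w : Int) (h_ : Int) : List (List Int) × List (List Int) :=
  let cy := PySem.Int.floordiv h_ 2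
  let cx := PySem.Int.floordiv w 2
  let sol := (PySem.List.pyRange 0 h_ 1).map (fun y =>
    (PySem.List.pyRange 0 w 1).map (fun x => pvClassify w h_ cy cx y x))
  let obj := List.replicate h_.toNat (List.replicate w.toNat (-1))
  (sol, obj)

-- ===== PRECONDITION & SPEC =====
-- Pre_ excludes w ≤ 0 or h ≤ 0, on which A raises IndexError (indexing into an empty grid or row).
def Pre_gen_dojo (w : Int) (h_ : Int) : Prop := 1 ≤ w ∧ 1 ≤ h_
instance (w : Int) (h_ : Int) : Decidable (Pre_gen_dojo w h_) := by unfold Pre_gen_dojo; infer_instance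
def pvWitness_gen_dojo : Int × Int := (7, 6)

def Spec_gen_dojo (w : Int) (h_ : Int) (out : List (List Int) × List (List Int)) : Prop := out = gen_dojo_alt w h_
instance (w : Int) (h_ : Int) (out : List (List Int) × List (List Int)) : Decidable (Spec_gen_dojo w h_ out) := by unfold Spec_gen_dojo; infer_instance

-- ===== CLAIM (what is proved, stated in full; the proofs are below) =====
def Claim_equal_gen_dojo : Prop := ∀ (w : Int) (h_ : Int), Dom_gen_dojo w h_ → Pre_gen_dojo w h_ → Spec_gen_dojo w h_ (gen_dojo w h_)

-- ===== LEMMAS AND PROOFS =====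

def pvCell (g : List (List Int)) (a b : Nat) : Int := (g.getD a []).getD b 0

def pvShape (H W : Nat) (g : List (List Int)) : Prop :=
  g.length = H ∧ ∀ r ∈ g, r.length = W

theorem pvShape_makeGrid (w h_ fill : Int) :
    pvShape h_.toNat w.toNat (pvMakeGrid w h_ fill) := by
  constructor
  · simp [pvMakeGrid]
  · intro r hr
    simp [pvMakeGrid] at hr
    simp [hr]

theorem pvSetCell_nonneg {y x : Int} (g : List (List Int)) (v : Int)
    (hy : 0 ≤ y) (hx : 0 ≤ x) :
    pvSetCell g y x v =
      if y < (g.length : Int) then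
        g.modify y.toNat (fun row => if x < (row.length : Int) then row.set x.toNat v else row)
      else g := by
  simp only [pvSetCell]
  have hyif : (if y < 0 then y + (g.length : Int) else y) = y := if_neg (by omega)
  have hxif : ∀ L : Nat, (if x < 0 then x + (L : Int) else x) = x := fun L => if_neg (by omega)
  simp only [hyif, hxif]
  by_cases hyl : y < (g.length : Int)
  · rw [if_pos ⟨hy, hyl⟩, if_pos hyl]
    congr 1
    funext row
    by_cases hxl : x < (row.length : Int)
    · rw [if_pos ⟨hx, hxl⟩, if_pos hxl]
    · rw [if_neg (by omega), if_neg hxl]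
  · rw [if_neg (by omega), if_neg hyl]

theorem pvShape_setCell {H W : Nat} {g : List (List Int)} (hs : pvShape H W g)
    {y x : Int} (v : Int) (hy : 0 ≤ y) (hx : 0 ≤ x) :
    pvShape H W (pvSetCell g y x v) := by
  obtain ⟨h1, h2⟩ := hs
  rw [pvSetCell_nonneg g v hy hx]
  split
  · refine ⟨by simpa using h1, ?_⟩
    intro r hr
    rw [List.mem_iff_getElem] at hr
    obtain ⟨i, hi, hri⟩ := hr
    rw [List.getElem_modify] at hri
    subst hri
    split
    · split
      · simpa using h2 _ (by simp)
      · exact h2 _ (by simp)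
    · exact h2 _ (by simp)
  · exact ⟨h1, h2⟩

theorem pvCell_makeGrid {w h_ fill : Int} {a b : Nat}
    (ha : a < h_.toNat) (hb : b < w.toNat) :
    pvCell (pvMakeGrid w h_ fill) a b = fill := by
  have h1 : (pvMakeGrid w h_ fill).getD a [] = List.replicate w.toNat fill := by
    unfold pvMakeGrid
    rw [List.getD_eq_getElem _ _ (by simpa using ha), List.getElem_replicate]
  unfold pvCell
  rw [h1, List.getD_eq_getElem _ _ (by simpa using hb), List.getElem_replicate]

theorem pvCell_setCell {H W : Nat} {g : List (List Int)} (hs : pvShape H W g)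
    {y x : Int} (v : Int) (hy : 0 ≤ y) (hx : 0 ≤ x) {a b : Nat}
    (ha : a < H) (hb : b < W) :
    pvCell (pvSetCell g y x v) a b = if y = (a : Int) ∧ x = (b : Int) then v else pvCell g a b := by
  obtain ⟨h1, h2⟩ := hs
  rw [pvSetCell_nonneg g v hy hx]
  by_cases hyl : y < (g.length : Int)
  · rw [if_pos hyl]
    unfold pvCell
    rw [List.getD_eq_getElem _ _ (by simp; omega : a < _), List.getElem_modify]
    by_cases hya : y.toNat = a
    · rw [if_pos hya]
      have hrow : g[a].length = W := h2 _ (by simp)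
      by_cases hxl : x < (g[a].length : Int)
      · rw [if_pos hxl]
        rw [List.getD_eq_getElem _ _ (by simp; omega : b < _), List.getElem_set]
        by_cases hxb : x.toNat = b
        · rw [if_pos hxb, if_pos (by omega)]
        · rw [if_neg hxb, if_neg (by omega)]
          rw [List.getD_eq_getElem g [] (by omega : a < g.length),
            List.getD_eq_getElem _ _ (show b < g[a].length by omega)]
      · rw [if_neg hxl, if_neg (by omega)]
        rw [List.getD_eq_getElem g [] (by omega : a < g.length)]
    · rw [if_neg hya, if_neg (by omega)]
      rw [List.getD_eq_getElem g [] (by omega : a < g.length)]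
  · rw [if_neg hyl, if_neg (by omega)]

theorem pvShape_foldl {α : Type} {H W : Nat} (l : List α)
    (f : List (List Int) → α → List (List Int))
    (hf : ∀ g x, x ∈ l → pvShape H W g → pvShape H W (f g x))
    {g : List (List Int)} (hg : pvShape H W g) : pvShape H W (l.foldl f g) := by
  induction l generalizing g with
  | nil => exact hg
  | cons x l ih =>
    exact ih (fun g' y hy hg' => hf g' y (List.mem_cons_of_mem _ hy) hg')
      (hf g x List.mem_cons_self hg)

-- stage 1: top-row wall writes
theorem pvCell_topwall {H W : Nat} (l : List Int) (hl : ∀ x ∈ l, 0 ≤ x)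
    {g : List (List Int)} (hs : pvShape H W g) {a b : Nat} (ha : a < H) (hb : b < W) :
    pvCell (l.foldl (fun s x => pvSetCell s 0 x 31) g) a b =
      if a = 0 ∧ (b : Int) ∈ l then 31 else pvCell g a b := by
  induction l generalizing g with
  | nil => simp
  | cons x l ih =>
    simp only [List.foldl_cons]
    rw [ih (fun y hy => hl y (by simp [hy])) (pvShape_setCell hs 31 le_rfl (hl x (by simp))) ]
    rw [pvCell_setCell hs 31 le_rfl (hl x (by simp)) ha hb]
    by_cases h1 : a = 0 ∧ (b : Int) ∈ l
    · rw [if_pos h1, if_pos ⟨h1.1, by simp [h1.2]⟩]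
    · rw [if_neg h1]
      by_cases h2 : (0 : Int) = (a : Int) ∧ x = (b : Int)
      · rw [if_pos h2, if_pos ⟨by omega, by rw [← h2.2]; exact List.mem_cons_self⟩]
      · rw [if_neg h2, if_neg (by
        rintro ⟨ha0, hbm⟩
        rcases List.mem_cons.mp hbm with h | h
        · exact h2 ⟨by omega, h.symm⟩
        · exact h1 ⟨ha0, h⟩)]

-- stage 2: left/right column wall writes
theorem pvCell_sidewall {H W : Nat} {w : Int} (hw : 1 ≤ w) (l : List Int)
    (hl : ∀ y ∈ l, 0 ≤ y)
    {g : List (List Int)} (hs : pvShape H W g) {a b : Nat} (ha : a < H) (hb : b < W) :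
    pvCell (l.foldl (fun s y => pvSetCell (pvSetCell s y 0 31) y (w - 1) 31) g) a b =
      if (a : Int) ∈ l ∧ ((b : Int) = 0 ∨ (b : Int) = w - 1) then 31 else pvCell g a b := by
  induction l generalizing g with
  | nil => simp
  | cons y l ih =>
    simp only [List.foldl_cons]
    have hs1 := pvShape_setCell hs (31 : Int) (hl y (by simp)) le_rfl
    have hs2 := pvShape_setCell hs1 (31 : Int) (hl y (by simp)) (show (0:Int) ≤ w - 1 by omega)
    rw [ih (fun z hz => hl z (by simp [hz])) hs2]
    rw [pvCell_setCell hs1 31 (hl y (by simp)) (show (0:Int) ≤ w - 1 by omega) ha hb]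
    rw [pvCell_setCell hs 31 (hl y (by simp)) le_rfl ha hb]
    by_cases h1 : (a : Int) ∈ l ∧ ((b : Int) = 0 ∨ (b : Int) = w - 1)
    · rw [if_pos h1, if_pos ⟨by simp [h1.1], h1.2⟩]
    · rw [if_neg h1]
      by_cases h2 : y = (a : Int) ∧ w - 1 = (b : Int)
      · rw [if_pos h2, if_pos ⟨by simp [← h2.1], Or.inr h2.2.symm⟩]
      · rw [if_neg h2]
        by_cases h3 : y = (a : Int) ∧ (0 : Int) = (b : Int)
        · rw [if_pos h3, if_pos ⟨by simp [← h3.1], Or.inl h3.2.symm⟩]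
        · rw [if_neg h3, if_neg (by
            rintro ⟨ham, hor⟩
            rcases List.mem_cons.mp ham with hy | hy
            · rcases hor with hb0 | hbw
              · exact h3 ⟨hy.symm, hb0.symm⟩
              · exact h2 ⟨hy.symm, hbw.symm⟩
            · exact h1 ⟨hy, hor⟩)]

-- stage 3, inner fold: carpet writes for one dy
theorem pvCell_carpet_inner {H W : Nat} {w h_ cy cx dy : Int} (es : List Int)
    {g : List (List Int)} (hs : pvShape H W g) {a b : Nat} (ha : a < H) (hb : b < W) :
    pvCell (es.foldl (fun s dx =>
        let ny := cy + dy
        let nx := cx + dx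
        if 0 < ny ∧ ny < h_ ∧ 0 < nx ∧ nx < w - 1 then pvSetCell s ny nx 29 else s) g) a b =
      if ∃ dx ∈ es, (0 < cy + dy ∧ cy + dy < h_ ∧ 0 < cx + dx ∧ cx + dx < w - 1) ∧
          cy + dy = (a : Int) ∧ cx + dx = (b : Int) then 29 else pvCell g a b := by
  induction es generalizing g with
  | nil => simp
  | cons dx es ih =>
    simp only [List.foldl_cons]
    by_cases hc : 0 < cy + dy ∧ cy + dy < h_ ∧ 0 < cx + dx ∧ cx + dx < w - 1
    · rw [if_pos hc]
      rw [ih (pvShape_setCell hs 29 (by omega) (by omega))]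
      rw [pvCell_setCell hs 29 (by omega) (by omega) ha hb]
      by_cases h1 : ∃ dx' ∈ es, (0 < cy + dy ∧ cy + dy < h_ ∧ 0 < cx + dx' ∧ cx + dx' < w - 1) ∧
          cy + dy = (a : Int) ∧ cx + dx' = (b : Int)
      · rw [if_pos h1, if_pos (by obtain ⟨d, hd, hp⟩ := h1; exact ⟨d, by simp [hd], hp⟩)]
      · rw [if_neg h1]
        by_cases h2 : cy + dy = (a : Int) ∧ cx + dx = (b : Int)
        · rw [if_pos h2, if_pos ⟨dx, by simp, hc, h2⟩]
        · rw [if_neg h2, if_neg (by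
            rintro ⟨d, hd, hp, he⟩
            rcases List.mem_cons.mp hd with h | h
            · subst h; exact h2 he
            · exact h1 ⟨d, h, hp, he⟩)]
    · rw [if_neg hc, ih hs]
      by_cases h1 : ∃ dx' ∈ es, (0 < cy + dy ∧ cy + dy < h_ ∧ 0 < cx + dx' ∧ cx + dx' < w - 1) ∧
          cy + dy = (a : Int) ∧ cx + dx' = (b : Int)
      · rw [if_pos h1, if_pos (by obtain ⟨d, hd, hp⟩ := h1; exact ⟨d, by simp [hd], hp⟩)]
      · rw [if_neg h1, if_neg (by
          rintro ⟨d, hd, hp, he⟩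
          rcases List.mem_cons.mp hd with h | h
          · subst h; exact hc hp
          · exact h1 ⟨d, h, hp, he⟩)]

-- stage 3, outer fold
theorem pvCell_carpet {H W : Nat} {w h_ cy cx : Int} (ds es : List Int)
    {g : List (List Int)} (hs : pvShape H W g) {a b : Nat} (ha : a < H) (hb : b < W) :
    pvCell (ds.foldl (fun s dy =>
        es.foldl (fun s dx =>
          let ny := cy + dy
          let nx := cx + dx
          if 0 < ny ∧ ny < h_ ∧ 0 < nx ∧ nx < w - 1 then pvSetCell s ny nx 29 else s) s) g) a b =
      if ∃ dy ∈ ds, ∃ dx ∈ es, (0 < cy + dy ∧ cy + dy < h_ ∧ 0 < cx + dx ∧ cx + dx < w - 1) ∧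
          cy + dy = (a : Int) ∧ cx + dx = (b : Int) then 29 else pvCell g a b := by
  induction ds generalizing g with
  | nil => simp
  | cons dy ds ih =>
    simp only [List.foldl_cons]
    have hsi : pvShape H W (es.foldl (fun s dx =>
        let ny := cy + dy
        let nx := cx + dx
        if 0 < ny ∧ ny < h_ ∧ 0 < nx ∧ nx < w - 1 then pvSetCell s ny nx 29 else s) g) := by
      apply pvShape_foldl _ _ _ hs
      intro g' dx _ hg'
      dsimp only
      split
      · exact pvShape_setCell hg' 29 (by omega) (by omega)
      · exact hg'
    rw [ih hsi, pvCell_carpet_inner es hs ha hb]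
    by_cases h1 : ∃ dy' ∈ ds, ∃ dx ∈ es, (0 < cy + dy' ∧ cy + dy' < h_ ∧ 0 < cx + dx ∧ cx + dx < w - 1) ∧
        cy + dy' = (a : Int) ∧ cx + dx = (b : Int)
    · rw [if_pos h1, if_pos (by obtain ⟨d, hd, hp⟩ := h1; exact ⟨d, by simp [hd], hp⟩)]
    · rw [if_neg h1]
      by_cases h2 : ∃ dx ∈ es, (0 < cy + dy ∧ cy + dy < h_ ∧ 0 < cx + dx ∧ cx + dx < w - 1) ∧
          cy + dy = (a : Int) ∧ cx + dx = (b : Int)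
      · rw [if_pos h2, if_pos (by obtain ⟨d, hd, hp⟩ := h2; exact ⟨dy, by simp, d, hd, hp⟩)]
      · rw [if_neg h2, if_neg (by
          rintro ⟨d, hd, hrest⟩
          rcases List.mem_cons.mp hd with h | h
          · subst h; exact h2 hrest
          · exact h1 ⟨d, h, hrest⟩)]

-- B side: cell of the comprehension grid
theorem pvCell_alt {w h_ : Int} {a b : Nat} (ha : a < h_.toNat) (hb : b < w.toNat) :
    pvCell ((PySem.List.pyRange 0 h_ 1).map (fun y =>
      (PySem.List.pyRange 0 w 1).map (fun x =>
        pvClassify w h_ (PySem.Int.floordiv h_ 2) (PySem.Int.floordiv w 2) y x))) a b =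
      pvClassify w h_ (PySem.Int.floordiv h_ 2) (PySem.Int.floordiv w 2) (a : Int) (b : Int) := by
  unfold pvCell
  rw [List.getD_eq_getElem _ []
    (by rw [List.length_map, PySem.List.length_pyRange_one]; omega)]
  rw [List.getElem_map, PySem.List.getElem_pyRange_one]
  rw [List.getD_eq_getElem _ 0
    (by rw [List.length_map, PySem.List.length_pyRange_one]; omega)]
  rw [List.getElem_map, PySem.List.getElem_pyRange_one]
  norm_num

theorem pvGridExt {H W : Nat} {g1 g2 : List (List Int)}
    (h1 : pvShape H W g1) (h2 : pvShape H W g2)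
    (hc : ∀ a b, a < H → b < W → pvCell g1 a b = pvCell g2 a b) : g1 = g2 := by
  apply List.ext_getElem (h1.1.trans h2.1.symm)
  intro i hi1 hi2
  apply List.ext_getElem
  · rw [h1.2 _ (by simp), h2.2 _ (by simp)]
  intro j hj1 hj2
  have hiH : i < H := by rw [← h1.1]; exact hi1
  have hjW : j < W := by rw [← h1.2 g1[i] (by simp)]; exact hj1
  have hcc := hc i j hiH hjW
  unfold pvCell at hcc
  rwa [List.getD_eq_getElem g1 [] hi1, List.getD_eq_getElem _ _ hj1,
    List.getD_eq_getElem g2 [] hi2, List.getD_eq_getElem _ _ hj2] at hcc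

-- ===== VERDICT (by name: the statement is the Claim_ definition above) =====
theorem gen_dojo_cells (w h_ : Int) (hw : 1 ≤ w) (hh : 1 ≤ h_) :
    (gen_dojo w h_).1 = (gen_dojo_alt w h_).1 := by
  simp only [gen_dojo, gen_dojo_alt]
  have hcy : PySem.Int.floordiv h_ 2 = h_ / 2 := PySem.Int.floordiv_eq_ediv_of_pos (by norm_num)
  have hcx : PySem.Int.floordiv w 2 = w / 2 := PySem.Int.floordiv_eq_ediv_of_pos (by norm_num)
  have hs0 : pvShape h_.toNat w.toNat (pvMakeGrid w h_ 42) := pvShape_makeGrid w h_ 42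
  have hs1 := pvShape_foldl (PySem.List.pyRange 0 w 1) (fun s x => pvSetCell s 0 x 31)
    (fun g x hx hg => pvShape_setCell hg 31 le_rfl (PySem.List.mem_pyRange_one.mp hx).1) hs0
  have hs2 := pvShape_foldl (PySem.List.pyRange 0 h_ 1)
    (fun s y => pvSetCell (pvSetCell s y 0 31) y (w - 1) 31)
    (fun g y hy hg => pvShape_setCell
      (pvShape_setCell hg 31 (PySem.List.mem_pyRange_one.mp hy).1 le_rfl)
      31 (PySem.List.mem_pyRange_one.mp hy).1 (show (0:Int) ≤ w - 1 by omega)) hs1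
  have hs3 := pvShape_foldl (PySem.List.pyRange (-2) 3 1)
    (fun s dy => (PySem.List.pyRange (-3) 4 1).foldl (fun s dx =>
        let ny := PySem.Int.floordiv h_ 2 + dy
        let nx := PySem.Int.floordiv w 2 + dx
        if 0 < ny ∧ ny < h_ ∧ 0 < nx ∧ nx < w - 1 then pvSetCell s ny nx 29 else s) s)
    (fun g dy _ hg => pvShape_foldl _ _
      (fun g' dx _ hg' => by
        dsimp only
        split
        · next hcnd => exact pvShape_setCell hg' 29 (by omega) (by omega)
        · exact hg') hg) hs2
  have hsB : pvShape h_.toNat w.toNat ((PySem.List.pyRange 0 h_ 1).map (fun y =>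
      (PySem.List.pyRange 0 w 1).map (fun x =>
        pvClassify w h_ (PySem.Int.floordiv h_ 2) (PySem.Int.floordiv w 2) y x))) := by
    constructor
    · rw [List.length_map, PySem.List.length_pyRange_one]; omega
    · intro r hr
      rw [List.mem_map] at hr
      obtain ⟨y, _, rfl⟩ := hr
      rw [List.length_map, PySem.List.length_pyRange_one]; omega
  refine pvGridExt (pvShape_setCell hs3 39 (show (0:Int) ≤ h_ - 1 by omega) (by omega)) hsB ?_
  intro a b ha hb
  rw [pvCell_setCell hs3 39 (show (0:Int) ≤ h_ - 1 by omega) (by omega) ha hb]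
  rw [pvCell_carpet _ _ hs2 ha hb]
  rw [pvCell_sidewall hw _ (fun y hy => (PySem.List.mem_pyRange_one.mp hy).1) hs1 ha hb]
  rw [pvCell_topwall _ (fun x hx => (PySem.List.mem_pyRange_one.mp hx).1) hs0 ha hb]
  rw [pvCell_makeGrid ha hb, pvCell_alt ha hb]
  simp only [pvClassify, PySem.List.mem_pyRange_one, hcy, hcx]
  by_cases hC : ∃ dy ∈ PySem.List.pyRange (-2) 3 1, ∃ dx ∈ PySem.List.pyRange (-3) 4 1,
      (0 < PySem.Int.floordiv h_ 2 + dy ∧ PySem.Int.floordiv h_ 2 + dy < h_ ∧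
        0 < PySem.Int.floordiv w 2 + dx ∧ PySem.Int.floordiv w 2 + dx < w - 1) ∧
      PySem.Int.floordiv h_ 2 + dy = (a : Int) ∧ PySem.Int.floordiv w 2 + dx = (b : Int)
  · rw [if_pos hC]
    obtain ⟨dy, hdy, dx, hdx, hcond, hea, heb⟩ := hC
    rw [PySem.List.mem_pyRange_one] at hdy hdx
    rw [hcy, hcx] at hcond
    rw [hcy] at hea
    rw [hcx] at heb
    have ha' : (a : Int) < h_ := by omega
    have hb' : (b : Int) < w := by omega
    split_ifs <;> omega
  · rw [if_neg hC]
    have hC' : ¬(0 < (a : Int) ∧ (a : Int) < h_ ∧ 0 < (b : Int) ∧ (b : Int) < w - 1 ∧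
        ((a : Int) - h_ / 2).natAbs ≤ 2 ∧ ((b : Int) - w / 2).natAbs ≤ 3) := by
      intro hcl
      apply hC
      refine ⟨(a : Int) - h_ / 2, ?_, (b : Int) - w / 2, ?_, ?_, ?_, ?_⟩ <;>
        simp only [hcy, hcx, PySem.List.mem_pyRange_one] <;> omega
    have ha' : (a : Int) < h_ := by omega
    have hb' : (b : Int) < w := by omega
    split_ifs <;> omega

-- ===== VERDICT (by name: the statement is the Claim_ definition above) =====
theorem gen_dojo_spec : Claim_equal_gen_dojo := by
  intro w h_ _hdom hpre
  obtain ⟨hw, hh⟩ := hpre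
  unfold Spec_gen_dojo
  refine Prod.ext (gen_dojo_cells w h_ hw hh) ?_
  rfl
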